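-- pv_equiv track=rewrite | github.com/samzong/samzong | skills/repo-skill-generator/scripts/repo_skill_generator/collector.py | parse_remote_slug
-- ===== SOURCE A (Python) =====
-- def parse_remote_slug(remote_url: str) -> str | None:
--     url = remote_url.removesuffix(".git")
--     prefixes = (
--         "https://github.com/",
--         "http://github.com/",
--         "ssh://git@github.com/",
--         "git@github.com:",
--     )
--     for prefix in prefixes:
--         if url.startswith(prefix):
--             return url[len(prefix) :]
--     return None
-- ===== SOURCE B (Python) =====
-- def parse_remote_slug(remote_url: str) -> str | None:
--     url = remote_url.removesuffix(".git")
--     # the scp-style form has no scheme separator before the slug: handle it first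
--     if url.startswith("git@github.com:"):
--         return url[len("git@github.com:"):]
--     # URL forms: split at the first scheme separator and dispatch on the scheme
--     scheme, sep, rest = url.partition("://")
--     if not sep:
--         return None
--     if scheme in ("https", "http"):
--         expected = "github.com/"
--     elif scheme == "ssh":
--         expected = "git@github.com/"
--     else:
--         return None
--     if rest.startswith(expected):
--         return rest[len(expected):]
--     return None
-- ===== Notes on version B (the rewrite author's own statement) =====
-- stated objective: alternative
-- what changed: B replaces A's linear scan over four full URL prefixes by handling the scp form first and then partitioning the URL at the first scheme separator, dispatching on the captured scheme to the required host prefix.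
import Mathlib
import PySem

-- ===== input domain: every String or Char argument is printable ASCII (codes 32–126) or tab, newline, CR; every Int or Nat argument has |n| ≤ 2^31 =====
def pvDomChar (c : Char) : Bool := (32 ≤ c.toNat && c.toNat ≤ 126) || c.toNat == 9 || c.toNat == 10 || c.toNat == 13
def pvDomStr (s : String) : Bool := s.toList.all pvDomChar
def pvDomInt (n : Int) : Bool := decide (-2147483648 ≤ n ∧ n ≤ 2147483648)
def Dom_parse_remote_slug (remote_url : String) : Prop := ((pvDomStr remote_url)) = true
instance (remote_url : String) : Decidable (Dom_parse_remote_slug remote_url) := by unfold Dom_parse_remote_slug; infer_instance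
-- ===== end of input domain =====

-- B replaces A's scan over four full URL prefixes by a partition of the URL at the first scheme
-- separator with a dispatch on the scheme (the scp form handled first); same return value.

-- ===== PORT A =====
-- url = remote_url.removesuffix(".git")  (the shared first line of both Pythons)
def pvRemovesuffixGit (s : String) : String :=
  if PySem.Str.endswith s ".git" then PySem.Str.slice s none (some (-4)) else s

-- for prefix in prefixes: if url.startswith(prefix): return url[len(prefix):]
def pvLoopA (url : String) : List String → Option String
  | [] => none
  | p :: ps =>
      if PySem.Str.startswith url p then
        some (PySem.Str.slice url (some (PySem.Str.len p)) none)
      else pvLoopA url ps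

def parse_remote_slug (remote_url : String) : Option String :=
  pvLoopA (pvRemovesuffixGit remote_url)
    ["https://github.com/", "http://github.com/", "ssh://git@github.com/", "git@github.com:"]

-- ===== PORT B =====
-- B's scheme → required-host-prefix dispatch
def pvExpected (scheme : String) : Option String :=
  if scheme = "https" ∨ scheme = "http" then some "github.com/"
  else if scheme = "ssh" then some "git@github.com/"
  else none

def parse_remote_slug_alt (remote_url : String) : Option String :=
  let url := pvRemovesuffixGit remote_url
  if PySem.Str.startswith url "git@github.com:" then
    some (PySem.Str.slice url (some 15) none)
  else
    -- scheme, sep, rest = url.partition("://"), via the index of the first "://"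
    let i := PySem.Str.find url "://"
    if i = -1 then none
    else
      match pvExpected (PySem.Str.slice url none (some i)) with
      | some exp =>
          let rest := PySem.Str.slice url (some (i + 3)) none
          if PySem.Str.startswith rest exp then
            some (PySem.Str.slice rest (some (PySem.Str.len exp)) none)
          else none
      | none => none

-- ===== PRECONDITION & SPEC =====
def Spec_parse_remote_slug (remote_url : String) (out : Option String) : Prop := out = parse_remote_slug_alt remote_url
instance (remote_url : String) (out : Option String) : Decidable (Spec_parse_remote_slug remote_url out) := by unfold Spec_parse_remote_slug; infer_instance

-- ===== CLAIM (what is proved, stated in full; the proofs are below) =====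
def Claim_equal_parse_remote_slug : Prop := ∀ (remote_url : String), Dom_parse_remote_slug remote_url → Spec_parse_remote_slug remote_url (parse_remote_slug remote_url)

-- ===== LEMMAS AND PROOFS =====

theorem pv_take_append {α : Type} (c t : List α) (n : Nat) (hn : n ≤ c.length) :
    (c ++ t).take n = c.take n := by
  rw [List.take_append, Nat.sub_eq_zero_of_le hn]
  simp

theorem pv_drop_append {α : Type} (c t : List α) (n : Nat) (hn : n ≤ c.length) :
    (c ++ t).drop n = c.drop n ++ t := by
  rw [List.drop_append, Nat.sub_eq_zero_of_le hn]
  simp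

theorem pv_prefix_append_iff {α : Type} {sub c : List α} (t : List α) (h : sub.length ≤ c.length) :
    sub <+: (c ++ t) ↔ sub <+: c := by
  constructor
  · intro hp
    have h1 := List.prefix_iff_eq_take.mp hp
    rw [pv_take_append c t _ h] at h1
    exact h1 ▸ List.take_prefix _ _
  · intro hp
    exact hp.trans (c.prefix_append t)

theorem pv_not_prefix_append {α : Type} {sub c : List α} (t : List α) (m : Nat) (hm : m ≤ c.length)
    (h : ¬ (sub.take m <+: c)) : ¬ sub <+: (c ++ t) := by
  intro hp
  apply h
  have h1 : sub.take m <+: c ++ t := (sub.take_prefix m).trans hp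
  have h2 : (sub.take m).length ≤ c.length := by
    have := List.length_take_le m sub
    omega
  exact (pv_prefix_append_iff t h2).mp h1

theorem pv_find_eq_nat (s sub : List Char) (k : Nat) (h1 : sub <+: s.drop k)
    (h2 : ∀ i < k, ¬ sub <+: s.drop i) : PySem.Chars.find s sub = (k : Int) := by
  have hinf : sub <:+: s := by
    obtain ⟨r, hr⟩ := h1
    exact ⟨s.take k, r, by rw [List.append_assoc, hr, List.take_append_drop]⟩
  have h0 : 0 ≤ PySem.Chars.find s sub := (PySem.Chars.find_nonneg_iff _ _).mpr hinf
  obtain ⟨hp, hmin⟩ := PySem.Chars.find_spec h0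
  rcases lt_trichotomy (PySem.Chars.find s sub).toNat k with h | h | h
  · exact absurd hp (h2 _ h)
  · omega
  · exact absurd h1 (hmin k h)

theorem pv_prefix_of_take_drop {α : Type} {a b u : List α} (k : Nat) (ha : u.take k = a)
    (hb : b <+: u.drop k) : a ++ b <+: u := by
  obtain ⟨r, hr⟩ := hb
  refine ⟨r, ?_⟩
  rw [List.append_assoc, hr, ← ha, List.take_append_drop]

theorem pv_scheme_case (L : List Char) (i : Int) (sch : List Char) (_h0 : 0 ≤ i)
    (hp : "://".toList <+: L.drop i.toNat) (htake : L.take i.toNat = sch) :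
    i.toNat = sch.length ∧ sch ++ "://".toList <+: L := by
  have hlen : min i.toNat L.length = sch.length := by rw [← List.length_take, htake]
  have h3 : ("://".toList).length = 3 := by decide
  have hd := hp.length_le
  rw [h3, List.length_drop] at hd
  have hk : i.toNat = sch.length := by omega
  exact ⟨hk, pv_prefix_of_take_drop i.toNat htake hp⟩

-- in B's no-match branch with a recognised scheme, the expected host prefix cannot follow, else A's
-- corresponding full prefix would hold
theorem pv_neg_branch (u : String) (i : Int) (sch mid full E : String) (h0 : 0 ≤ i)
    (hp : "://".toList <+: u.toList.drop i.toNat)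
    (hs : PySem.Str.slice u none (some i) = sch)
    (hmidlen : mid.toList.length = sch.toList.length + 3)
    (hmid : sch.toList ++ "://".toList = mid.toList)
    (hfull : mid.toList ++ E.toList = full.toList)
    (hnf : ¬ full.toList <+: u.toList) :
    PySem.Chars.startswith (PySem.Str.slice u (some (i + 3)) none).toList E.toList = false := by
  rw [Bool.eq_false_iff]
  intro h
  have hsl : u.toList.take i.toNat = sch.toList := by
    have h1 := congrArg String.toList hs
    rwa [PySem.Str.toList_slice, PySem.Chars.slice_eq_listSlice, PySem.List.slice_to _ h0] at h1
  obtain ⟨hk, hpre⟩ := pv_scheme_case u.toList i sch.toList h0 hp hsl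
  have hE : E.toList <+: u.toList.drop mid.toList.length := by
    have h' := (PySem.Chars.startswith_iff _ _).mp h
    rw [PySem.Str.toList_slice, PySem.Chars.slice_eq_listSlice,
        PySem.List.slice_from _ (by omega)] at h'
    have hkk : (i + 3).toNat = mid.toList.length := by omega
    rwa [hkk] at h'
  have htake : u.toList.take mid.toList.length = mid.toList :=
    (List.prefix_iff_eq_take.mp (hmid ▸ hpre)).symm
  exact hnf (hfull ▸ pv_prefix_of_take_drop mid.toList.length htake hE)

-- ===== VERDICT (by name: the statement is the Claim_ definition above) =====
theorem parse_remote_slug_spec : Claim_equal_parse_remote_slug := by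
  intro r _
  unfold Spec_parse_remote_slug parse_remote_slug parse_remote_slug_alt
  generalize pvRemovesuffixGit r = u
  simp only [pvLoopA, PySem.Str.startswith_eq, PySem.Str.find_eq, PySem.Str.len_eq]
  by_cases h1 : "https://github.com/".toList <+: u.toList
  · -- case https://github.com/
    obtain ⟨t, ht⟩ := h1
    have hA : PySem.Chars.startswith u.toList "https://github.com/".toList = true :=
      (PySem.Chars.startswith_iff _ _).mpr ⟨t, ht⟩
    have hG : PySem.Chars.startswith u.toList "git@github.com:".toList = false := by
      rw [Bool.eq_false_iff]
      intro h
      exact pv_not_prefix_append t 1 (by decide) (by decide)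
        (ht ▸ (PySem.Chars.startswith_iff _ _).mp h)
    have hf : PySem.Chars.find u.toList "://".toList = (5 : Int) := by
      have h := pv_find_eq_nat u.toList "://".toList 5
        (by rw [← ht, pv_drop_append _ _ _ (by decide)]
            exact (pv_prefix_append_iff t (by decide)).mpr (by decide))
        (by intro j hj
            rw [← ht]
            interval_cases j <;>
              (rw [pv_drop_append _ _ _ (by decide)]
               exact pv_not_prefix_append t 3 (by decide) (by decide)))
      exact_mod_cast h
    have hscheme : PySem.Str.slice u none (some (5 : Int)) = "https" := by
      rw [← String.toList_inj, PySem.Str.toList_slice, PySem.Chars.slice_eq_listSlice,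
          PySem.List.slice_to _ (by norm_num), ← ht]
      rw [show ((5 : Int)).toNat = 5 from by decide, pv_take_append _ _ _ (by decide)]
      decide
    rw [hA, hG, hf]
    rw [if_pos rfl, if_neg (by simp), if_neg (by norm_num), hscheme,
        show pvExpected "https" = some "github.com/" from by decide]
    simp
    constructor
    · apply (PySem.Chars.startswith_iff _ _).mpr
      rw [PySem.List.slice_from _ (by norm_num), show ((8 : Int)).toNat = 8 from by decide,
          ← ht, pv_drop_append _ _ _ (by decide),
          show "https://github.com/".toList.drop 8 = "github.com/".toList from by decide]
      exact (pv_prefix_append_iff t (by decide)).mpr (by decide)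
    · rw [← String.toList_inj]
      simp only [PySem.Str.toList_slice, PySem.Chars.slice_eq_listSlice]
      rw [PySem.List.slice_from _ (by norm_num), PySem.List.slice_from _ (by norm_num),
          PySem.List.slice_from _ (by norm_num),
          show ((19 : Int)).toNat = 19 from by decide,
          show ((8 : Int)).toNat = 8 from by decide,
          show ((11 : Int)).toNat = 11 from by decide, ← ht,
          pv_drop_append _ _ _ (by decide),
          show "https://github.com/".toList.drop 19 = ([] : List Char) from by decide, List.nil_append,
          pv_drop_append _ _ _ (by decide),
          show "https://github.com/".toList.drop 8 = "github.com/".toList from by decide,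
          pv_drop_append _ _ _ (by decide),
          show "github.com/".toList.drop 11 = ([] : List Char) from by decide, List.nil_append]
  rw [if_neg (by simpa using fun h => h1 ((PySem.Chars.startswith_iff _ _).mp h))]
  by_cases h2 : "http://github.com/".toList <+: u.toList
  · -- case http://github.com/
    obtain ⟨t, ht⟩ := h2
    have hA : PySem.Chars.startswith u.toList "http://github.com/".toList = true :=
      (PySem.Chars.startswith_iff _ _).mpr ⟨t, ht⟩
    have hG : PySem.Chars.startswith u.toList "git@github.com:".toList = false := by
      rw [Bool.eq_false_iff]
      intro h
      exact pv_not_prefix_append t 1 (by decide) (by decide)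
        (ht ▸ (PySem.Chars.startswith_iff _ _).mp h)
    have hf : PySem.Chars.find u.toList "://".toList = (4 : Int) := by
      have h := pv_find_eq_nat u.toList "://".toList 4
        (by rw [← ht, pv_drop_append _ _ _ (by decide)]
            exact (pv_prefix_append_iff t (by decide)).mpr (by decide))
        (by intro j hj
            rw [← ht]
            interval_cases j <;>
              (rw [pv_drop_append _ _ _ (by decide)]
               exact pv_not_prefix_append t 3 (by decide) (by decide)))
      exact_mod_cast h
    have hscheme : PySem.Str.slice u none (some (4 : Int)) = "http" := by
      rw [← String.toList_inj, PySem.Str.toList_slice, PySem.Chars.slice_eq_listSlice,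
          PySem.List.slice_to _ (by norm_num), ← ht]
      rw [show ((4 : Int)).toNat = 4 from by decide, pv_take_append _ _ _ (by decide)]
      decide
    rw [hA, hG, hf]
    rw [if_pos rfl, if_neg (by simp), if_neg (by norm_num), hscheme,
        show pvExpected "http" = some "github.com/" from by decide]
    simp
    constructor
    · apply (PySem.Chars.startswith_iff _ _).mpr
      rw [PySem.List.slice_from _ (by norm_num), show ((7 : Int)).toNat = 7 from by decide,
          ← ht, pv_drop_append _ _ _ (by decide),
          show "http://github.com/".toList.drop 7 = "github.com/".toList from by decide]
      exact (pv_prefix_append_iff t (by decide)).mpr (by decide)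
    · rw [← String.toList_inj]
      simp only [PySem.Str.toList_slice, PySem.Chars.slice_eq_listSlice]
      rw [PySem.List.slice_from _ (by norm_num), PySem.List.slice_from _ (by norm_num),
          PySem.List.slice_from _ (by norm_num),
          show ((18 : Int)).toNat = 18 from by decide,
          show ((7 : Int)).toNat = 7 from by decide,
          show ((11 : Int)).toNat = 11 from by decide, ← ht,
          pv_drop_append _ _ _ (by decide),
          show "http://github.com/".toList.drop 18 = ([] : List Char) from by decide, List.nil_append,
          pv_drop_append _ _ _ (by decide),
          show "http://github.com/".toList.drop 7 = "github.com/".toList from by decide,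
          pv_drop_append _ _ _ (by decide),
          show "github.com/".toList.drop 11 = ([] : List Char) from by decide, List.nil_append]
  rw [if_neg (by simpa using fun h => h2 ((PySem.Chars.startswith_iff _ _).mp h))]
  by_cases h3 : "ssh://git@github.com/".toList <+: u.toList
  · -- case ssh://git@github.com/
    obtain ⟨t, ht⟩ := h3
    have hA : PySem.Chars.startswith u.toList "ssh://git@github.com/".toList = true :=
      (PySem.Chars.startswith_iff _ _).mpr ⟨t, ht⟩
    have hG : PySem.Chars.startswith u.toList "git@github.com:".toList = false := by
      rw [Bool.eq_false_iff]
      intro h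
      exact pv_not_prefix_append t 1 (by decide) (by decide)
        (ht ▸ (PySem.Chars.startswith_iff _ _).mp h)
    have hf : PySem.Chars.find u.toList "://".toList = (3 : Int) := by
      have h := pv_find_eq_nat u.toList "://".toList 3
        (by rw [← ht, pv_drop_append _ _ _ (by decide)]
            exact (pv_prefix_append_iff t (by decide)).mpr (by decide))
        (by intro j hj
            rw [← ht]
            interval_cases j <;>
              (rw [pv_drop_append _ _ _ (by decide)]
               exact pv_not_prefix_append t 3 (by decide) (by decide)))
      exact_mod_cast h
    have hscheme : PySem.Str.slice u none (some (3 : Int)) = "ssh" := by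
      rw [← String.toList_inj, PySem.Str.toList_slice, PySem.Chars.slice_eq_listSlice,
          PySem.List.slice_to _ (by norm_num), ← ht]
      rw [show ((3 : Int)).toNat = 3 from by decide, pv_take_append _ _ _ (by decide)]
      decide
    rw [hA, hG, hf]
    rw [if_pos rfl, if_neg (by simp), if_neg (by norm_num), hscheme,
        show pvExpected "ssh" = some "git@github.com/" from by decide]
    simp
    constructor
    · apply (PySem.Chars.startswith_iff _ _).mpr
      rw [PySem.List.slice_from _ (by norm_num), show ((6 : Int)).toNat = 6 from by decide,
          ← ht, pv_drop_append _ _ _ (by decide),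
          show "ssh://git@github.com/".toList.drop 6 = "git@github.com/".toList from by decide]
      exact (pv_prefix_append_iff t (by decide)).mpr (by decide)
    · rw [← String.toList_inj]
      simp only [PySem.Str.toList_slice, PySem.Chars.slice_eq_listSlice]
      rw [PySem.List.slice_from _ (by norm_num), PySem.List.slice_from _ (by norm_num),
          PySem.List.slice_from _ (by norm_num),
          show ((21 : Int)).toNat = 21 from by decide,
          show ((6 : Int)).toNat = 6 from by decide,
          show ((15 : Int)).toNat = 15 from by decide, ← ht,
          pv_drop_append _ _ _ (by decide),
          show "ssh://git@github.com/".toList.drop 21 = ([] : List Char) from by decide, List.nil_append,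
          pv_drop_append _ _ _ (by decide),
          show "ssh://git@github.com/".toList.drop 6 = "git@github.com/".toList from by decide,
          pv_drop_append _ _ _ (by decide),
          show "git@github.com/".toList.drop 15 = ([] : List Char) from by decide, List.nil_append]
  rw [if_neg (by simpa using fun h => h3 ((PySem.Chars.startswith_iff _ _).mp h))]
  by_cases h4 : "git@github.com:".toList <+: u.toList
  · -- case git@github.com:
    have hG : PySem.Chars.startswith u.toList "git@github.com:".toList = true :=
      (PySem.Chars.startswith_iff _ _).mpr h4
    rw [hG, if_pos rfl, if_pos rfl,
        show (("git@github.com:".toList.length : Nat) : Int) = (15 : Int) from by decide]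
  · -- case: none of the four prefixes
    have hG : PySem.Chars.startswith u.toList "git@github.com:".toList = false := by
      rw [Bool.eq_false_iff]
      exact fun h => h4 ((PySem.Chars.startswith_iff _ _).mp h)
    rw [hG, if_neg (by simp), if_neg (by simp)]
    by_cases hneg : PySem.Chars.find u.toList "://".toList = -1
    · rw [if_pos hneg]
    rw [if_neg hneg]
    have h0 : 0 ≤ PySem.Chars.find u.toList "://".toList := by
      have := PySem.Chars.neg_one_le_find u.toList "://".toList
      omega
    obtain ⟨hp, -⟩ := PySem.Chars.find_spec h0
    by_cases hs1 : PySem.Str.slice u none (some (PySem.Chars.find u.toList "://".toList)) = "https"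
    · have hF := pv_neg_branch u _ "https" "https://" "https://github.com/" "github.com/" h0 hp hs1
        (by decide) (by decide) (by decide) h1
      rw [hs1, show pvExpected "https" = some "github.com/" from by decide]
      simp only [hF, Bool.false_eq_true, if_false]
    by_cases hs2 : PySem.Str.slice u none (some (PySem.Chars.find u.toList "://".toList)) = "http"
    · have hF := pv_neg_branch u _ "http" "http://" "http://github.com/" "github.com/" h0 hp hs2
        (by decide) (by decide) (by decide) h2
      rw [hs2, show pvExpected "http" = some "github.com/" from by decide]
      simp only [hF, Bool.false_eq_true, if_false]
    by_cases hs3 : PySem.Str.slice u none (some (PySem.Chars.find u.toList "://".toList)) = "ssh"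
    · have hF := pv_neg_branch u _ "ssh" "ssh://" "ssh://git@github.com/" "git@github.com/" h0 hp hs3
        (by decide) (by decide) (by decide) h3
      rw [hs3, show pvExpected "ssh" = some "git@github.com/" from by decide]
      simp only [hF, Bool.false_eq_true, if_false]
    · rw [show pvExpected (PySem.Str.slice u none
          (some (PySem.Chars.find u.toList "://".toList))) = none from by
        unfold pvExpected
        rw [if_neg (by tauto), if_neg hs3]]
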